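-- pv_equiv track=rewrite | github.com/ssshhh0402/Y.C.S.T | Python/2020쿠팡/3번.py | solution
-- ===== SOURCE A (Python) =====
-- def find(removed, target):
--     answer = 0
--     for item in target[0]:
--         if item in removed:
--             answer += 1
--     return target[1] - answer
--
-- def solution(k, score):
--     removes = {}
--     removed = []
--     used = [1 for _ in range(len(score))]
--     for idx in range(1, len(score)):
--         sco = abs(score[idx]-score[idx-1])
--         if sco in removes.keys():
--             removes[sco][0].append((idx-1, idx))
--             removes[sco][1] += 1
--         else:
--             removes[sco] = [([(idx-1, idx)]), 1]
--     for scos in removes.keys():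
--         if find(removed, removes[scos]) >= k:
--             for remove in removes[scos][0]:
--                 used[remove[0]] = 0
--                 used[remove[1]] = 0
--             removed.extend(removes[scos][0])
--     return sum(used)
-- ===== SOURCE B (Python) =====
-- def solution(k, score):
--     diffs = [abs(score[i] - score[i - 1]) for i in range(1, len(score))]
--     counts = {}
--     for d in diffs:
--         counts[d] = counts.get(d, 0) + 1
--     removed = set()
--     for j, d in enumerate(diffs):
--         if counts[d] >= k:
--             removed.add(j)
--             removed.add(j + 1)
--     return len(score) - len(removed)
-- ===== Notes on version B (the rewrite author's own statement) =====
-- stated objective: simpler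
-- what changed: A groups adjacent-difference pairs into a dict of [pair-list, count] and re-scans a growing removed-pairs list with a membership-counting find; B builds a plain count dict over the diff list in one pass, then re-scans the adjacencies once, collecting removed indices in a set and returning len(score) minus its size.
import Mathlib
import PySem

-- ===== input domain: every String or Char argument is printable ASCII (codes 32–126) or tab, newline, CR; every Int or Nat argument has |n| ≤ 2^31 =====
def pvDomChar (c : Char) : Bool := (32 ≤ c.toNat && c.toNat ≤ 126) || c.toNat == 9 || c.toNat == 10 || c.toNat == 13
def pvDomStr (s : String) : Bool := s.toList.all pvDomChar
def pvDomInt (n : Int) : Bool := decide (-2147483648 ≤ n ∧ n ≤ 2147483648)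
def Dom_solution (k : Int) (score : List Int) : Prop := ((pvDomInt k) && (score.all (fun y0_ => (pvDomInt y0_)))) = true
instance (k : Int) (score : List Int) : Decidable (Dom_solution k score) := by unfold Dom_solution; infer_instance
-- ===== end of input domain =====

-- B replaces A's dict-of-pair-groups + membership-scanning `find` + 0/1 used array by one diff list,
-- a plain count dict and a set of removed indices rebuilt by re-scanning adjacencies (simpler decomposition).

-- ===== PORT A =====
def findA (removed : List (Int × Int)) (target : List (Int × Int) × Int) : Int :=
  let answer : Int := target.1.foldl (fun a item => if item ∈ removed then a + 1 else a) 0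
  target.2 - answer

def solution (k : Int) (score : List Int) : Int :=
  let removes : PySem.Dict Int (List (Int × Int) × Int) :=
    (PySem.List.pyRange 1 (PySem.List.len score) 1).foldl
      (fun d idx =>
        let sco : Int := |PySem.List.pyGetD score idx 0 - PySem.List.pyGetD score (idx - 1) 0|
        if d.contains sco then
          d.insert sco ((d.getD sco ([], 0)).1 ++ [(idx - 1, idx)], (d.getD sco ([], 0)).2 + 1)
        else
          d.insert sco ([(idx - 1, idx)], 1))
      PySem.Dict.empty
  let st :=
    removes.keys.foldl
      (fun (st : List Int × List (Int × Int)) scos =>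
        let grp := removes.getD scos ([], 0)
        if findA st.2 grp ≥ k then
          (grp.1.foldl (fun u rm => PySem.List.pySetD (PySem.List.pySetD u rm.1 0) rm.2 0) st.1,
           st.2 ++ grp.1)
        else st)
      ((PySem.List.pyRange 0 (PySem.List.len score) 1).map (fun _ => (1 : Int)), [])
  st.1.sum

-- ===== PORT B =====
def solution_alt (k : Int) (score : List Int) : Int :=
  let diffs : List Int :=
    (PySem.List.pyRange 1 (PySem.List.len score) 1).map
      (fun i => |PySem.List.pyGetD score i 0 - PySem.List.pyGetD score (i - 1) 0|)
  let counts : PySem.Dict Int Int :=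
    diffs.foldl (fun d x => d.insert x (d.getD x 0 + 1)) PySem.Dict.empty
  let removed : PySem.Set Int :=
    (PySem.List.enumerate diffs).foldl
      (fun s p =>
        if counts.getD p.2 0 ≥ k then PySem.Set.add (PySem.Set.add s p.1) (p.1 + 1) else s)
      PySem.Set.empty
  PySem.List.len score - PySem.List.len removed

-- ===== PRECONDITION & SPEC =====
def Spec_solution (k : Int) (score : List Int) (out : Int) : Prop := out = solution_alt k score
instance (k : Int) (score : List Int) (out : Int) : Decidable (Spec_solution k score out) := by unfold Spec_solution; infer_instance

-- ===== CLAIM (what is proved, stated in full; the proofs are below) =====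
def Claim_equal_solution : Prop := ∀ (k : Int) (score : List Int), Dom_solution k score → Spec_solution k score (solution k score)




-- ===== LEMMAS AND PROOFS =====

-- Proof-side abbreviations for the quantities both programs compute.
def pvDiff (score : List Int) (i : Int) : Int :=
  |PySem.List.pyGetD score i 0 - PySem.List.pyGetD score (i - 1) 0|

def pvIdxs (score : List Int) : List Int :=
  PySem.List.pyRange 1 (PySem.List.len score) 1

def pvDiffs (score : List Int) : List Int := (pvIdxs score).map (pvDiff score)

def pvPairs (score : List Int) (c : Int) : List (Int × Int) :=
  ((pvIdxs score).filter (fun i => pvDiff score i == c)).map (fun i => (i - 1, i))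

def pvCnt (score : List Int) (c : Int) : Int :=
  ((pvIdxs score).countP (fun i => pvDiff score i == c) : Int)

def pvU0 (score : List Int) : List Int :=
  (PySem.List.pyRange 0 (PySem.List.len score) 1).map (fun _ => (1 : Int))

def zeroAll (u : List Int) (P : List Int) : List Int :=
  P.foldl (fun u p => PySem.List.pySetD u p 0) u

def zeroPairs (u : List Int) (ps : List (Int × Int)) : List Int :=
  ps.foldl (fun u rm => PySem.List.pySetD (PySem.List.pySetD u rm.1 0) rm.2 0) u

def pvPos (k : Int) (score : List Int) : List Int :=
  ((PySem.Set.ofList (pvDiffs score)).filter (fun c => decide (pvCnt score c ≥ k))).flatMap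
    (fun c => (pvPairs score c).flatMap (fun rm => [rm.1, rm.2]))

def pvRemoves (score : List Int) : PySem.Dict Int (List (Int × Int) × Int) :=
  (pvIdxs score).foldl
    (fun d i => d.insert (pvDiff score i)
      ((d.getD (pvDiff score i) ([], 0)).1 ++ [(i - 1, i)],
       (d.getD (pvDiff score i) ([], 0)).2 + 1))
    PySem.Dict.empty

-- the first loop of A, with its branch removed (both branches insert the same value)
theorem stepA_uniform (score : List Int) :
    (fun (d : PySem.Dict Int (List (Int × Int) × Int)) (idx : Int) =>
      let sco : Int := |PySem.List.pyGetD score idx 0 - PySem.List.pyGetD score (idx - 1) 0|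
      if d.contains sco then
        d.insert sco ((d.getD sco ([], 0)).1 ++ [(idx - 1, idx)], (d.getD sco ([], 0)).2 + 1)
      else
        d.insert sco ([(idx - 1, idx)], 1))
    = (fun d idx => d.insert (pvDiff score idx)
        ((d.getD (pvDiff score idx) ([], 0)).1 ++ [(idx - 1, idx)],
         (d.getD (pvDiff score idx) ([], 0)).2 + 1)) := by
  funext d idx
  by_cases h : d.contains (|PySem.List.pyGetD score idx 0 - PySem.List.pyGetD score (idx - 1) 0|) = true
  · simp [pvDiff, h]
  · have h' : d.contains (|PySem.List.pyGetD score idx 0 - PySem.List.pyGetD score (idx - 1) 0|) = false := by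
      simpa using h
    simp [pvDiff, h', PySem.Dict.getD_of_not_contains]

theorem solution_unfold (k : Int) (score : List Int) :
    solution k score
      = ((pvRemoves score).keys.foldl
          (fun (st : List Int × List (Int × Int)) scos =>
            if findA st.2 ((pvRemoves score).getD scos ([], 0)) ≥ k then
              (zeroPairs st.1 ((pvRemoves score).getD scos ([], 0)).1,
               st.2 ++ ((pvRemoves score).getD scos ([], 0)).1)
            else st)
          (pvU0 score, [])).1.sum := by
  unfold solution
  rw [stepA_uniform score]
  rfl

theorem solution_alt_unfold (k : Int) (score : List Int) :
    solution_alt k score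
      = PySem.List.len score - PySem.List.len
          ((PySem.List.enumerate (pvDiffs score) 0).foldl
            (fun (s : PySem.Set Int) p =>
              if ((pvDiffs score).foldl (fun d x => d.insert x (d.getD x 0 + 1))
                    PySem.Dict.empty).getD p.2 0 ≥ k then
                PySem.Set.add (PySem.Set.add s p.1) (p.1 + 1)
              else s)
            PySem.Set.empty) := rfl

-- grouping loop: looking up any key gives (its pair group, its multiplicity)
theorem grp_fold_getD (key : Int → Int) (L : List Int)
    (d : PySem.Dict Int (List (Int × Int) × Int)) (c : Int) :
    (L.foldl (fun d i => d.insert (key i)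
        ((d.getD (key i) ([], 0)).1 ++ [(i - 1, i)], (d.getD (key i) ([], 0)).2 + 1)) d).getD c ([], 0)
      = ((d.getD c ([], 0)).1 ++ (L.filter (fun i => key i == c)).map (fun i => (i - 1, i)),
         (d.getD c ([], 0)).2 + (L.countP (fun i => key i == c) : Int)) := by
  induction L generalizing d with
  | nil => simp
  | cons a L ih =>
    rw [List.foldl_cons, ih, PySem.Dict.getD_insert]
    by_cases h : c = key a
    · rw [if_pos h]
      subst h
      simp only [List.filter_cons, List.countP_cons, beq_self_eq_true, if_true, Prod.mk.injEq]
      exact ⟨by simp, by push_cast; ring⟩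
    · rw [if_neg h]
      have hb : (key a == c) = false := by
        rw [beq_eq_false_iff_ne]
        exact fun hh => h hh.symm
      simp [hb]

theorem count_map_eq (f : Int → Int) (l : List Int) (c : Int) :
    (l.map f).count c = l.countP (fun i => f i == c) := by
  induction l with
  | nil => rfl
  | cons a l ih => simp [List.count_cons, List.countP_cons, ih]

theorem cnt_eq_count (score : List Int) (c : Int) :
    pvCnt score c = ((pvDiffs score).count c : Int) := by
  unfold pvCnt pvDiffs
  rw [count_map_eq]

theorem mem_pvPairs (score : List Int) (c : Int) (p : Int × Int) :
    p ∈ pvPairs score c ↔ ∃ i ∈ pvIdxs score, pvDiff score i = c ∧ p = (i - 1, i) := by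
  simp only [pvPairs, List.mem_map, List.mem_filter, beq_iff_eq]
  constructor
  · rintro ⟨i, ⟨hi, hd⟩, rfl⟩
    exact ⟨i, hi, hd, rfl⟩
  · rintro ⟨i, hi, hd, rfl⟩
    exact ⟨i, ⟨hi, hd⟩, rfl⟩

-- second loop of A: while keys are fresh, `find` sees no removed pair, so it returns the count
theorem loopA (k : Int) (score : List Int) (P : Int → List (Int × Int)) (C : Int → Int)
    (hP : ∀ c p, p ∈ P c → ∃ i ∈ pvIdxs score, pvDiff score i = c ∧ p = (i - 1, i))
    (K : List Int) (u : List Int) (r : List (Int × Int)) (hnd : K.Nodup)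
    (hinv : ∀ i ∈ pvIdxs score, pvDiff score i ∈ K → (i - 1, i) ∉ r) :
    (K.foldl (fun (st : List Int × List (Int × Int)) c =>
        if findA st.2 (P c, C c) ≥ k then
          (zeroPairs st.1 (P c), st.2 ++ P c)
        else st) (u, r)).1
      = K.foldl (fun u c => if C c ≥ k then zeroPairs u (P c) else u) u := by
  induction K generalizing u r with
  | nil => rfl
  | cons c K ih =>
    have hcK : c ∉ K := (List.nodup_cons.1 hnd).1
    have hndK : K.Nodup := (List.nodup_cons.1 hnd).2
    have hnone : ∀ p ∈ P c, p ∉ r := by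
      intro p hp
      rcases hP c p hp with ⟨i, hi, hdi, rfl⟩
      exact hinv i hi (by rw [hdi]; exact List.mem_cons_self)
    have hfind : findA r (P c, C c) = C c := by
      unfold findA
      rw [PySem.List.foldl_ite_add_one]
      have h0 : (P c).countP (fun x => decide (x ∈ r)) = 0 := by
        rw [List.countP_eq_zero]
        intro p hp
        simpa using hnone p hp
      simp [h0]
    rw [List.foldl_cons, List.foldl_cons, hfind]
    by_cases hq : C c ≥ k
    · rw [if_pos hq, if_pos hq]
      apply ih _ _ hndK
      intro i hi hdK hmem
      rcases List.mem_append.1 hmem with hA | hB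
      · exact hinv i hi (List.mem_cons_of_mem _ hdK) hA
      · rcases hP c _ hB with ⟨i', _, hdi', heq⟩
        have : i = i' := by
          have := congrArg Prod.snd heq
          simpa using this
        subst this
        rw [hdi'] at hdK
        exact hcK hdK
    · rw [if_neg hq, if_neg hq]
      apply ih _ _ hndK
      intro i hi hdK
      exact hinv i hi (List.mem_cons_of_mem _ hdK)

theorem zeroPairs_eq_zeroAll (ps : List (Int × Int)) (u : List Int) :
    zeroPairs u ps = zeroAll u (ps.flatMap (fun rm => [rm.1, rm.2])) := by
  induction ps generalizing u with
  | nil => rfl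
  | cons a ps ih =>
    show zeroPairs (PySem.List.pySetD (PySem.List.pySetD u a.1 0) a.2 0) ps = _
    rw [ih]
    simp [zeroAll, List.flatMap_cons]

theorem foldl_zeroAll_flatMap (L : List Int) (g : Int → List Int) (u : List Int) :
    L.foldl (fun u c => zeroAll u (g c)) u = zeroAll u (L.flatMap g) := by
  induction L generalizing u with
  | nil => rfl
  | cons c L ih =>
    rw [List.foldl_cons, ih]
    simp [zeroAll, List.flatMap_cons, List.foldl_append]

theorem length_zeroAll (P : List Int) (u : List Int) : (zeroAll u P).length = u.length := by
  induction P generalizing u with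
  | nil => rfl
  | cons p P ih =>
    show (zeroAll (PySem.List.pySetD u p 0) P).length = _
    rw [ih, PySem.List.length_pySetD]

theorem zeroAll_getElem? (P : List Int) (u : List Int)
    (hP : ∀ p ∈ P, 0 ≤ p ∧ p < (u.length : Int)) (j : Nat) (hj : j < u.length) :
    (zeroAll u P)[j]? = if (j : Int) ∈ P then some 0 else u[j]? := by
  induction P generalizing u with
  | nil => simp [zeroAll]
  | cons p P ih =>
    have h0 := hP p List.mem_cons_self
    have hset : PySem.List.pySetD u p 0 = u.set p.toNat 0 :=
      PySem.List.pySetD_of_nonneg u 0 h0.1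
    have hlen : (PySem.List.pySetD u p 0).length = u.length := PySem.List.length_pySetD u p 0
    have ihs := ih (PySem.List.pySetD u p 0)
      (by intro q hq; have := hP q (List.mem_cons_of_mem _ hq); rw [hlen]; exact this)
      (by rw [hlen]; exact hj)
    show (zeroAll (PySem.List.pySetD u p 0) P)[j]? = _
    rw [ihs]
    by_cases hjP : (j : Int) ∈ P
    · simp [hjP, List.mem_cons]
    · by_cases hjp : (j : Int) = p
      · have hpt : p.toNat = j := by omega
        rw [hset, List.getElem?_set]
        simp [hpt, hj, hjp, List.mem_cons]
      · have hpt : ¬ p.toNat = j := by omega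
        rw [hset, List.getElem?_set]
        simp [hpt, hjP, hjp, List.mem_cons]

theorem mem_pvPos (k : Int) (score : List Int) (j : Int) :
    j ∈ pvPos k score ↔
      ∃ i ∈ pvIdxs score, pvCnt score (pvDiff score i) ≥ k ∧ (j = i - 1 ∨ j = i) := by
  unfold pvPos
  rw [List.mem_flatMap]
  constructor
  · rintro ⟨c, hc, hj⟩
    rcases List.mem_filter.1 hc with ⟨_, hq⟩
    rcases List.mem_flatMap.1 hj with ⟨rm, hrm, hjrm⟩
    rcases (mem_pvPairs _ _ _).1 hrm with ⟨i, hi, hdi, rfl⟩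
    refine ⟨i, hi, ?_, ?_⟩
    · rw [hdi]; exact of_decide_eq_true hq
    · simpa using hjrm
  · rintro ⟨i, hi, hq, hj⟩
    refine ⟨pvDiff score i, ?_, ?_⟩
    · rw [List.mem_filter]
      refine ⟨?_, by simpa using hq⟩
      rw [PySem.Set.mem_ofList]
      exact List.mem_map_of_mem hi
    · rw [List.mem_flatMap]
      refine ⟨(i - 1, i), (mem_pvPairs _ _ _).2 ⟨i, hi, rfl, rfl⟩, ?_⟩
      simpa using hj

theorem mem_pvIdxs (score : List Int) (i : Int) :
    i ∈ pvIdxs score ↔ 1 ≤ i ∧ i < (score.length : Int) := by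
  unfold pvIdxs
  rw [PySem.List.mem_pyRange_one, PySem.List.len_eq]

theorem pvPos_bounds (k : Int) (score : List Int) :
    ∀ p ∈ pvPos k score, 0 ≤ p ∧ p < (score.length : Int) := by
  intro p hp
  rcases (mem_pvPos k score p).1 hp with ⟨i, hi, _, hcase⟩
  have := (mem_pvIdxs score i).1 hi
  omega

theorem pvU0_eq (score : List Int) : pvU0 score = List.replicate score.length (1 : Int) := by
  unfold pvU0
  rw [PySem.List.len_eq, PySem.List.pyRange_one]
  simp [Function.comp_def, List.map_const']

theorem sum_ite_zero_one (l : List Nat) (Q : Nat → Prop) [DecidablePred Q] :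
    (l.map (fun j => if Q j then (0 : Int) else 1)).sum
      = (l.length : Int) - (l.countP (fun j => decide (Q j)) : Int) := by
  induction l with
  | nil => simp
  | cons a l ih =>
    simp only [List.map_cons, List.sum_cons, List.countP_cons, List.length_cons, ih]
    by_cases h : Q a
    · simp only [h, if_pos, decide_true]
      push_cast
      ring
    · simp only [h, if_neg, decide_false, not_false_eq_true]
      push_cast
      ring

theorem zeroAll_u0_eq (score : List Int) (P : List Int)
    (hP : ∀ p ∈ P, 0 ≤ p ∧ p < (score.length : Int)) :
    zeroAll (pvU0 score) P
      = (List.range score.length).map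
          (fun (j : Nat) => if (j : Int) ∈ P then (0 : Int) else 1) := by
  have hu0len : (pvU0 score).length = score.length := by rw [pvU0_eq]; simp
  apply List.ext_getElem?
  intro j
  by_cases hj : j < score.length
  · rw [zeroAll_getElem? P (pvU0 score) (by rw [hu0len]; exact hP) j (by omega)]
    by_cases hjP : (j : Int) ∈ P
    · simp [hjP, hj]
    · simp [hjP, hj, pvU0_eq]
  · have h1 : (zeroAll (pvU0 score) P).length ≤ j := by
      rw [length_zeroAll, hu0len]; omega
    have h2 : ((List.range score.length).map
        (fun (j : Nat) => if (j : Int) ∈ P then (0 : Int) else 1)).length ≤ j := by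
      simp; omega
    rw [List.getElem?_eq_none h1, List.getElem?_eq_none h2]

-- A's result, closed form
theorem solutionA_closed (k : Int) (score : List Int) :
    solution k score
      = (score.length : Int)
        - ((List.range score.length).countP
            (fun (j : Nat) => decide ((j : Int) ∈ pvPos k score)) : Int) := by
  rw [solution_unfold]
  have hkeys : (pvRemoves score).keys = PySem.Set.ofList (pvDiffs score) := by
    unfold pvRemoves
    rw [PySem.Dict.keys_foldl_insert_key]
    rw [PySem.Dict.keys_empty, PySem.Set.update_nil_left]
    rfl
  have hgetD : ∀ c, (pvRemoves score).getD c ([], 0) = (pvPairs score c, pvCnt score c) := by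
    intro c
    unfold pvRemoves
    rw [grp_fold_getD]
    simp [pvPairs, pvCnt, PySem.Dict.getD_empty]
  simp only [hkeys, hgetD]
  rw [loopA k score (pvPairs score) (pvCnt score)
    (fun c p hp => (mem_pvPairs score c p).1 hp)
    (PySem.Set.ofList (pvDiffs score)) (pvU0 score) []
    (PySem.Set.nodup_ofList _) (by intro i _ _ h; simp at h)]
  rw [PySem.List.foldl_ite_eq_foldl_filter]
  have hzp : ∀ (u : List Int) (c : Int), zeroPairs u (pvPairs score c)
      = zeroAll u ((pvPairs score c).flatMap (fun rm => [rm.1, rm.2])) :=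
    fun u c => zeroPairs_eq_zeroAll _ u
  simp only [hzp]
  rw [foldl_zeroAll_flatMap]
  rw [show ((PySem.Set.ofList (pvDiffs score)).filter
        (fun c => decide (pvCnt score c ≥ k))).flatMap
        (fun c => (pvPairs score c).flatMap (fun rm => [rm.1, rm.2])) = pvPos k score from rfl]
  rw [zeroAll_u0_eq score (pvPos k score) (pvPos_bounds k score), sum_ite_zero_one]
  simp

-- B side
theorem removed_mem (cond : Int → Prop) [DecidablePred cond]
    (L : List (Int × Int)) (s : PySem.Set Int) (j : Int) :
    (j ∈ L.foldl (fun s p => if cond p.2 then PySem.Set.add (PySem.Set.add s p.1) (p.1 + 1) else s) s)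
      ↔ j ∈ s ∨ ∃ p ∈ L, cond p.2 ∧ (j = p.1 ∨ j = p.1 + 1) := by
  induction L generalizing s with
  | nil => simp
  | cons a L ih =>
    rw [List.foldl_cons]
    by_cases h : cond a.2
    · rw [if_pos h, ih]
      simp only [PySem.Set.mem_add, List.mem_cons]
      constructor
      · rintro (((hs | h1) | h2) | ⟨p, hp, hc, hj⟩)
        · exact Or.inl hs
        · exact Or.inr ⟨a, Or.inl rfl, h, Or.inl h1⟩
        · exact Or.inr ⟨a, Or.inl rfl, h, Or.inr h2⟩
        · exact Or.inr ⟨p, Or.inr hp, hc, hj⟩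
      · rintro (hs | ⟨p, (rfl | hp), hc, hj⟩)
        · exact Or.inl (Or.inl (Or.inl hs))
        · rcases hj with h1 | h2
          · exact Or.inl (Or.inl (Or.inr h1))
          · exact Or.inl (Or.inr h2)
        · exact Or.inr ⟨p, hp, hc, hj⟩
    · rw [if_neg h, ih]
      simp only [List.mem_cons]
      constructor
      · rintro (hs | ⟨p, hp, hc, hj⟩)
        · exact Or.inl hs
        · exact Or.inr ⟨p, Or.inr hp, hc, hj⟩
      · rintro (hs | ⟨p, (rfl | hp), hc, hj⟩)
        · exact Or.inl hs
        · exact absurd hc h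
        · exact Or.inr ⟨p, hp, hc, hj⟩

theorem removed_nodup (cond : Int → Prop) [DecidablePred cond]
    (L : List (Int × Int)) (s : PySem.Set Int) (hs : s.Nodup) :
    (L.foldl (fun s p => if cond p.2 then PySem.Set.add (PySem.Set.add s p.1) (p.1 + 1) else s) s).Nodup := by
  induction L generalizing s with
  | nil => exact hs
  | cons a L ih =>
    rw [List.foldl_cons]
    by_cases h : cond a.2
    · rw [if_pos h]
      exact ih _ (PySem.Set.nodup_add _ _ (PySem.Set.nodup_add _ _ hs))
    · rw [if_neg h]
      exact ih _ hs

theorem mem_enum_iff (k : Int) (score : List Int) (j : Int) :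
    (∃ p ∈ PySem.List.enumerate (pvDiffs score) 0,
        pvCnt score p.2 ≥ k ∧ (j = p.1 ∨ j = p.1 + 1))
      ↔ ∃ i ∈ pvIdxs score, pvCnt score (pvDiff score i) ≥ k ∧ (j = i - 1 ∨ j = i) := by
  constructor
  · rintro ⟨p, hp, hq, hj⟩
    rcases (PySem.List.mem_enumerate_iff _ _ _).1 hp with ⟨m, hm, heq⟩
    subst heq
    have hmlen : m < (pvIdxs score).length := by
      simpa [pvDiffs] using hm
    have hdm : (pvDiffs score)[m] = pvDiff score ((pvIdxs score)[m]) := by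
      simp [pvDiffs]
    have hidx : (pvIdxs score)[m] = 1 + (m : Int) := by
      unfold pvIdxs
      exact PySem.List.getElem_pyRange_one _ _ _ _
    refine ⟨(pvIdxs score)[m], List.getElem_mem _, ?_, ?_⟩
    · rw [← hdm]; simpa using hq
    · rw [hidx]
      simp only at hj
      omega
  · rintro ⟨i, hi, hq, hj⟩
    have hi' := (mem_pvIdxs score i).1 hi
    have hlen : (pvDiffs score).length = ((score.length : Int) - 1).toNat := by
      simp [pvDiffs, pvIdxs, PySem.List.length_pyRange_one, PySem.List.len_eq]
    have hm : (i - 1).toNat < (pvDiffs score).length := by rw [hlen]; omega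
    refine ⟨(0 + ((i - 1).toNat : Int), (pvDiffs score)[(i - 1).toNat]),
      (PySem.List.mem_enumerate_iff _ _ _).2 ⟨(i - 1).toNat, hm, rfl⟩, ?_, ?_⟩
    · have hm' : (i - 1).toNat < (pvIdxs score).length := by simpa [pvDiffs] using hm
      have hdm : (pvDiffs score)[(i - 1).toNat] = pvDiff score ((pvIdxs score)[(i - 1).toNat]'hm') := by
        simp [pvDiffs]
      have hidx : (pvIdxs score)[(i - 1).toNat]'hm' = 1 + ((i - 1).toNat : Int) := by
        unfold pvIdxs
        exact PySem.List.getElem_pyRange_one _ _ _ _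
      have heq : (1 : Int) + ((i - 1).toNat : Int) = i := by omega
      rw [hdm, hidx, heq]
      exact hq
    · simp only
      omega

theorem solutionB_closed (k : Int) (score : List Int) :
    solution_alt k score
      = (score.length : Int)
        - ((List.range score.length).countP
            (fun (j : Nat) => decide ((j : Int) ∈ pvPos k score)) : Int) := by
  rw [solution_alt_unfold]
  have hcnt : ∀ (v : Int),
      ((pvDiffs score).foldl (fun d x => d.insert x (d.getD x 0 + 1)) PySem.Dict.empty).getD v 0
        = pvCnt score v := by
    intro v
    rw [PySem.Dict.getD_foldl_insert_add_one, PySem.Dict.getD_empty, cnt_eq_count]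
    simp
  simp only [hcnt]
  set rem := (PySem.List.enumerate (pvDiffs score) 0).foldl
      (fun (s : PySem.Set Int) p =>
        if pvCnt score p.2 ≥ k then PySem.Set.add (PySem.Set.add s p.1) (p.1 + 1) else s)
      PySem.Set.empty with hrem
  have hmem : ∀ j : Int, j ∈ rem ↔ j ∈ pvPos k score := by
    intro j
    rw [hrem, removed_mem (fun c => pvCnt score c ≥ k), mem_pvPos]
    constructor
    · rintro (h | h)
      · exact absurd h List.not_mem_nil
      · exact (mem_enum_iff k score j).1 h
    · intro h
      exact Or.inr ((mem_enum_iff k score j).2 h)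
  have hnd : rem.Nodup := by
    rw [hrem]
    exact removed_nodup (fun c => pvCnt score c ≥ k) _ _ List.nodup_nil
  have hRL : rem.length
      = (List.range score.length).countP (fun (j : Nat) => decide ((j : Int) ∈ pvPos k score)) := by
    have hperm : rem.Perm (((List.range score.length).filter
        (fun (j : Nat) => decide ((j : Int) ∈ pvPos k score))).map (fun (j : Nat) => (j : Int))) := by
      rw [List.perm_ext_iff_of_nodup hnd]
      · intro a
        rw [hmem a]
        simp only [List.mem_map, List.mem_filter, List.mem_range, decide_eq_true_eq]
        constructor
        · intro ha
          have hb := pvPos_bounds k score a ha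
          refine ⟨a.toNat, ⟨by omega, ?_⟩, by omega⟩
          rw [Int.toNat_of_nonneg hb.1]
          exact ha
        · rintro ⟨j, ⟨_, hj⟩, rfl⟩
          exact hj
      · apply List.Nodup.map
        · intro x y hxy; simpa using hxy
        · exact List.Nodup.filter _ List.nodup_range
    rw [hperm.length_eq, List.length_map, ← List.countP_eq_length_filter]
  rw [PySem.List.len_eq, PySem.List.len_eq, hRL]

-- ===== VERDICT (by name: the statement is the Claim_ definition above) =====
theorem solution_spec : Claim_equal_solution := by
  intro k score _
  unfold Spec_solution
  rw [solutionA_closed, solutionB_closed]
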